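-- pv_equiv track=rewrite | github.com/Noam-St/2022_Metazoan_mtDNA_Project | 03_Gene_order/03_03_Gene_neighbors/proximity_probabillity_matrix.py | adjacent_genes
-- ===== SOURCE A (Python) =====
-- def adjacent_genes(gorder, gene1, gene2):
--   """
--   Recieves a single gorder list and two gene names, returns True if the genes
--   are adjascent and False if not, takes into account the circularity of mtDNA
--
--   Parameters
--   ----------
--   gorder : list
--     An organism's gene order
--   gene1 : str
--     A gene name str
--   gene2 : str
--     A gene name str
--
--   Returns
--   -------
--   bool
--     True if the genes are adj, False otherwise (the genes are adj if the absolute value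
--     of the diff between their indices equals 1 or if they are at both ends
--     of the gene order because the mtDNA is circular).
--   """
--   gindex1 = [i for i,v in enumerate(gorder) if v == gene1] #iterate over all occurances of gene1 and grab indices
--   gindex2 = [i for i,v in enumerate(gorder) if v == gene2] #iterate over all occurances of gene1 and grab indices
--   for i in gindex1:
--     for j in gindex2:
--       result = (abs(i - j) == 1) or (set([gorder[-1], gorder[0]]) == set([gene1, gene2]))
--       if result: return result
--   return False
-- ===== SOURCE B (Python) =====
-- def adjacent_genes(gorder, gene1, gene2):
--   """Single scan over the n circular adjacent pairs instead of index lists + nested loops."""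
--   n = len(gorder)
--   gset = {gene1, gene2}
--   for i in range(n):
--     if {gorder[i], gorder[(i + 1) % n]} == gset:
--       return True
--   return False
-- ===== Notes on version B (the rewrite author's own statement) =====
-- stated objective: simpler
-- what changed: Replaced the two enumerate-built index lists and the quadratic nested loop over all occurrence pairs with a single pass over the n circular adjacent pairs, comparing each unordered pair set with {gene1, gene2}; the modulo wrap covers the first-last circular edge uniformly.
import Mathlib
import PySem

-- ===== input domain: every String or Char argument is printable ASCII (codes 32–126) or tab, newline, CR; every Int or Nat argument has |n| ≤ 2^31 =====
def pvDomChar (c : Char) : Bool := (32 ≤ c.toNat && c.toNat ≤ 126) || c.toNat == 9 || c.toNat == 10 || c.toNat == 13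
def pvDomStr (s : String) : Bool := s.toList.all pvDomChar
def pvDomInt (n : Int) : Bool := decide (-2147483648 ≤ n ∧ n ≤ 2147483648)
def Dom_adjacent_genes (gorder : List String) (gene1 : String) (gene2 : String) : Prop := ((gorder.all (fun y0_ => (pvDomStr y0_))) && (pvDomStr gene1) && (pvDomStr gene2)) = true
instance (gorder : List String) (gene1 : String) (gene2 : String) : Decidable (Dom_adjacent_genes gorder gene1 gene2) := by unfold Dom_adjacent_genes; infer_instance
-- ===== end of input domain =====

-- B replaces the index lists + nested occurrence loop with one scan over the n circular adjacent pairs (simpler).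


-- ===== PORT A =====
-- gorder[-1] is ported with pyGetD: the wrap test only runs inside the loops, where both index
-- lists are nonempty, so gorder ≠ [] and the default "" is never the looked-up value.
def adjacent_genes (gorder : List String) (gene1 : String) (gene2 : String) : Bool :=
  let gindex1 := ((PySem.List.enumerate gorder).filter (fun p => p.2 == gene1)).map (fun p => p.1)
  let gindex2 := ((PySem.List.enumerate gorder).filter (fun p => p.2 == gene2)).map (fun p => p.1)
  gindex1.any (fun i => gindex2.any (fun j =>
    ((i - j).natAbs == 1) ||
    PySem.Set.equal
      (PySem.Set.ofList [PySem.List.pyGetD gorder (-1) "", PySem.List.pyGetD gorder 0 ""])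
      (PySem.Set.ofList [gene1, gene2])))

-- ===== PORT B =====
-- gorder[i] and gorder[(i+1)%n] are in range for every i in range(n), so pyGetD's default is never taken.
def adjacent_genes_alt (gorder : List String) (gene1 : String) (gene2 : String) : Bool :=
  let n := gorder.length
  let gset := PySem.Set.ofList [gene1, gene2]
  (List.range n).any (fun i =>
    PySem.Set.equal
      (PySem.Set.ofList [PySem.List.pyGetD gorder (i : Int) "",
                         PySem.List.pyGetD gorder (((i + 1) % n : Nat) : Int) ""])
      gset)

-- ===== PRECONDITION & SPEC =====
def Spec_adjacent_genes (gorder : List String) (gene1 : String) (gene2 : String) (out : Bool) : Prop := out = adjacent_genes_alt gorder gene1 gene2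
instance (gorder : List String) (gene1 : String) (gene2 : String) (out : Bool) : Decidable (Spec_adjacent_genes gorder gene1 gene2 out) := by unfold Spec_adjacent_genes; infer_instance

-- ===== CLAIM (what is proved, stated in full; the proofs are below) =====
def Claim_equal_adjacent_genes : Prop := ∀ (gorder : List String) (gene1 : String) (gene2 : String), Dom_adjacent_genes gorder gene1 gene2 → Spec_adjacent_genes gorder gene1 gene2 (adjacent_genes gorder gene1 gene2)

-- ===== LEMMAS AND PROOFS =====

def Wrap (l : List String) (g1 g2 : String) : Prop :=
  (l.getD (l.length - 1) "" = g1 ∧ l.getD 0 "" = g2) ∨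
  (l.getD (l.length - 1) "" = g2 ∧ l.getD 0 "" = g1)


theorem pairSetEq (a b c d : String) :
    PySem.Set.equal (PySem.Set.ofList [a, b]) (PySem.Set.ofList [c, d]) = true ↔
      (a = c ∧ b = d) ∨ (a = d ∧ b = c) := by
  rw [PySem.Set.equal_iff]
  simp only [PySem.Set.mem_ofList, List.mem_cons, List.not_mem_nil, or_false]
  constructor
  · intro h
    have ha := (h a).1 (Or.inl rfl)
    have hb := (h b).1 (Or.inr rfl)
    have hc := (h c).2 (Or.inl rfl)
    have hd := (h d).2 (Or.inr rfl)
    rcases ha with ha | ha <;> rcases hb with hb | hb <;> rcases hc with hc | hc <;> rcases hd with hd | hd <;> subst ha <;> subst hb <;> tauto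
  · rintro (⟨rfl, rfl⟩ | ⟨rfl, rfl⟩) x <;> tauto


theorem pyGetD_neg_one (l : List String) (h : l ≠ []) :
    PySem.List.pyGetD l (-1) "" = l.getD (l.length - 1) "" := by
  have hl : 1 ≤ l.length := List.length_pos_iff.2 h
  simp [PySem.List.pyGetD, PySem.List.pyGet?, PySem.List.pyIdx?, hl, List.getD]


theorem pyGetD_zero (l : List String) (h : l ≠ []) :
    PySem.List.pyGetD l (0 : Int) "" = l.getD 0 "" := by
  have hl : 0 < l.length := List.length_pos_iff.2 h
  simp [PySem.List.pyGetD, PySem.List.pyGet?, PySem.List.pyIdx?, hl, List.getD]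


theorem getD_lt (l : List String) (k : Nat) (h : k < l.length) : l.getD k "" = l[k] := by
  simp [List.getD, List.getElem?_eq_getElem h]


theorem pyGetD_nat (l : List String) (k : Nat) :
    PySem.List.pyGetD l (k : Int) "" = l.getD k "" := by
  simp [PySem.List.pyGetD_natCast, List.getD]


theorem A_iff (l : List String) (g1 g2 : String) :
    adjacent_genes l g1 g2 = true ↔
      ∃ i j : Nat, i < l.length ∧ j < l.length ∧ l.getD i "" = g1 ∧ l.getD j "" = g2 ∧
        ((i = j + 1 ∨ j = i + 1) ∨ Wrap l g1 g2) := by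
  unfold adjacent_genes
  simp only [List.any_eq_true, List.mem_map, List.mem_filter, PySem.List.mem_enumerate_iff]
  constructor
  · rintro ⟨i, ⟨⟨p, ⟨⟨k, hk, rfl⟩, hpe⟩, rfl⟩, j, ⟨q, ⟨⟨m, hm, rfl⟩, hqe⟩, rfl⟩, hcond⟩⟩
    have hne : l ≠ [] := by intro h; subst h; exact absurd hk (by simp)
    simp only [beq_iff_eq] at hpe hqe
    refine ⟨k, m, hk, hm, by rw [getD_lt l k hk]; exact hpe, by rw [getD_lt l m hm]; exact hqe, ?_⟩
    rcases Bool.or_eq_true_iff.1 hcond with h1 | h2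
    · left
      simp only [beq_iff_eq] at h1
      have : ((0:Int) + ↑k - (0 + ↑m)).natAbs = 1 := h1
      omega
    · right
      rw [pyGetD_neg_one l hne, pyGetD_zero l hne] at h2
      exact (pairSetEq _ _ _ _).1 h2
  · rintro ⟨i, j, hi, hj, hgi, hgj, hc⟩
    have hne : l ≠ [] := by intro h; subst h; exact absurd hi (by simp)
    refine ⟨(0:Int) + ↑i, ⟨((0:Int) + ↑i, l[i]), ⟨⟨i, hi, rfl⟩, by
              simp only [beq_iff_eq]; rw [← getD_lt l i hi]; exact hgi⟩, rfl⟩,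
            (0:Int) + ↑j, ⟨((0:Int) + ↑j, l[j]), ⟨⟨j, hj, rfl⟩, by
              simp only [beq_iff_eq]; rw [← getD_lt l j hj]; exact hgj⟩, rfl⟩, ?_⟩
    rcases hc with hadj | hw
    · apply Bool.or_eq_true_iff.2; left
      simp only [beq_iff_eq]
      show ((0:Int) + ↑i - (0 + ↑j)).natAbs = 1
      omega
    · apply Bool.or_eq_true_iff.2; right
      rw [pyGetD_neg_one l hne, pyGetD_zero l hne]
      exact (pairSetEq _ _ _ _).2 hw

theorem B_iff (l : List String) (g1 g2 : String) :
    adjacent_genes_alt l g1 g2 = true ↔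
      ∃ i : Nat, i < l.length ∧
        ((l.getD i "" = g1 ∧ l.getD ((i + 1) % l.length) "" = g2) ∨
         (l.getD i "" = g2 ∧ l.getD ((i + 1) % l.length) "" = g1)) := by
  unfold adjacent_genes_alt
  simp only [List.any_eq_true, List.mem_range, pyGetD_nat, pairSetEq]


theorem AB_iff (l : List String) (g1 g2 : String) :
    adjacent_genes l g1 g2 = true ↔ adjacent_genes_alt l g1 g2 = true := by
  rw [A_iff, B_iff]
  constructor
  · rintro ⟨i, j, hi, hj, hgi, hgj, (hadj | hw)⟩
    · rcases hadj with rfl | rfl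
      · -- i = j + 1 : pair starting at j
        refine ⟨j, hj, Or.inr ⟨hgj, ?_⟩⟩
        rwa [Nat.mod_eq_of_lt hi]
      · refine ⟨i, hi, Or.inl ⟨hgi, ?_⟩⟩
        rwa [Nat.mod_eq_of_lt hj]
    · -- wrap: witness n-1
      refine ⟨l.length - 1, by omega, ?_⟩
      have h0 : (l.length - 1 + 1) % l.length = 0 := by
        rw [Nat.sub_add_cancel (by omega), Nat.mod_self]
      rw [h0]
      rcases hw with ⟨h1, h2⟩ | ⟨h1, h2⟩
      · exact Or.inl ⟨h1, h2⟩
      · exact Or.inr ⟨h1, h2⟩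
  · rintro ⟨i, hi, (⟨h1, h2⟩ | ⟨h1, h2⟩)⟩
    · by_cases hlast : i + 1 < l.length
      · rw [Nat.mod_eq_of_lt hlast] at h2
        exact ⟨i, i + 1, hi, hlast, h1, h2, Or.inl (Or.inr rfl)⟩
      · have h0 : (i + 1) % l.length = 0 := by
          have : i + 1 = l.length := by omega
          rw [this, Nat.mod_self]
        rw [h0] at h2
        have hieq : i = l.length - 1 := by omega
        exact ⟨i, 0, hi, by omega, h1, h2, Or.inr (Or.inl ⟨by rw [← hieq]; exact h1, h2⟩)⟩
    · by_cases hlast : i + 1 < l.length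
      · rw [Nat.mod_eq_of_lt hlast] at h2
        exact ⟨i + 1, i, hlast, hi, h2, h1, Or.inl (Or.inl rfl)⟩
      · have h0 : (i + 1) % l.length = 0 := by
          have : i + 1 = l.length := by omega
          rw [this, Nat.mod_self]
        rw [h0] at h2
        have hieq : i = l.length - 1 := by omega
        exact ⟨0, i, by omega, hi, h2, h1, Or.inr (Or.inr ⟨by rw [← hieq]; exact h1, h2⟩)⟩

-- ===== VERDICT (by name: the statement is the Claim_ definition above) =====
theorem adjacent_genes_spec : Claim_equal_adjacent_genes := by
  intro l g1 g2 _
  unfold Spec_adjacent_genes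
  have h := AB_iff l g1 g2
  cases hA : adjacent_genes l g1 g2 <;> cases hB : adjacent_genes_alt l g1 g2 <;> simp_all
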